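-- pv_equiv track=rewrite | github.com/leeyaxi/NER | BERT-NER-distill-Pytorch/processors/utils_ner.py | word_pos_alignment
-- ===== SOURCE A (Python) =====
-- def word_pos_alignment(cut_token_ls, origin_token_ls):
--         cur_pos = 0
--         origin_pos = 0
--         last_len = 0
--         cut_pos_align_dic = {}
--         while cur_pos < len(cut_token_ls) and origin_pos < len(origin_token_ls):
--             cur_cut_word = cut_token_ls[cur_pos]
--             cur_origin_char = origin_token_ls[origin_pos]
--
--             if len(cur_cut_word) > len(cur_origin_char) + last_len:
--                 last_len += len(cur_origin_char)
--                 if cur_pos not in cut_pos_align_dic: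
--                     cut_pos_align_dic[cur_pos] = [origin_pos]
--                 else:
--                     cut_pos_align_dic[cur_pos].append(origin_pos)
--                 origin_pos += 1
--             else:
--                 last_len = 0
--                 if cur_pos not in cut_pos_align_dic:
--                     cut_pos_align_dic[cur_pos] = [origin_pos]
--                 else:
--                     cut_pos_align_dic[cur_pos].append(origin_pos)
--                 cur_pos += 1
--                 origin_pos += 1
--         return cut_pos_align_dic
-- ===== SOURCE B (Python) =====
-- def word_pos_alignment(cut_token_ls, origin_token_ls):
--     # Prefix sums of origin-char lengths; each cut word's span of origin positions is
--     # found by a binary search on the prefix array instead of a char-by-char greedy walk.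
--     n = len(origin_token_ls)
--     prefix = [0]
--     for tok in origin_token_ls:
--         prefix.append(prefix[-1] + len(tok))
--     align = {}
--     pos = 0
--     for i in range(len(cut_token_ls)):
--         if pos >= n:
--             break
--         target = prefix[pos] + len(cut_token_ls[i])
--         lo, hi = pos + 1, n + 1
--         while lo < hi:
--             mid = (lo + hi) // 2
--             if prefix[mid] < target:
--                 lo = mid + 1
--             else:
--                 hi = mid
--         c = min(lo - pos, n - pos)
--         align[i] = list(range(pos, pos + c))
--         pos += c
--     return align
-- ===== Notes on version B (the rewrite author's own statement) =====
-- stated objective: alternative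
-- what changed: Replaces A's char-by-char two-pointer greedy walk by precomputed prefix sums of origin-char lengths plus a per-cut-word binary search that locates the whole consumed span at once, materialised as a range.
import Mathlib
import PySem

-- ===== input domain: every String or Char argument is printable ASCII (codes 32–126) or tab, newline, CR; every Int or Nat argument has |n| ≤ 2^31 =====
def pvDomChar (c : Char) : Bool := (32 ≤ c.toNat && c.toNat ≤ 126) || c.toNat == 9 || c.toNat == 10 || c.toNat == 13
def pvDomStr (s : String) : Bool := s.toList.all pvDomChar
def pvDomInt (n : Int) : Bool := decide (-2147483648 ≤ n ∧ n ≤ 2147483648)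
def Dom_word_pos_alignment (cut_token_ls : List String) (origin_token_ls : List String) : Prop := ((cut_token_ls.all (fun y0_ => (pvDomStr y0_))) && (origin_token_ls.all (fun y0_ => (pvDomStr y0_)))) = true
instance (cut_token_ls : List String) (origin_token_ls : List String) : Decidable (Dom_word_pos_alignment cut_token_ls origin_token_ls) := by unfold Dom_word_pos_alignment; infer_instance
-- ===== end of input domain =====

-- B replaces A's char-by-char greedy walk by prefix sums of origin lengths plus a binary
-- search per cut word that locates each consumed span at once (a different algorithm, not faster).

-- ===== PORT A =====
-- A's single while loop: state (cur_pos, origin_pos, last_len, dic); origin_pos rises by 1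
-- each iteration, so recursion is on the remaining origin suffix.
def wpaLoopA (cut origin : List String) (cur_pos origin_pos last_len : Nat)
    (dic : PySem.Dict Int (List Int)) : PySem.Dict Int (List Int) :=
  if h : cur_pos < cut.length ∧ origin_pos < origin.length then
    let cur_cut_word := cut[cur_pos]'h.1
    let cur_origin_char := origin[origin_pos]'h.2
    -- 'if cur_pos not in dic: dic[cur_pos] = [origin_pos] else: dic[cur_pos].append(origin_pos)'
    let dic' := if dic.contains (cur_pos : Int) then
        dic.insert (cur_pos : Int) (dic.getD (cur_pos : Int) [] ++ [(origin_pos : Int)])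
      else dic.insert (cur_pos : Int) [(origin_pos : Int)]
    if cur_cut_word.length > cur_origin_char.length + last_len then
      wpaLoopA cut origin cur_pos (origin_pos + 1) (last_len + cur_origin_char.length) dic'
    else
      wpaLoopA cut origin (cur_pos + 1) (origin_pos + 1) 0 dic'
  else dic
termination_by origin.length - origin_pos
decreasing_by all_goals omega

def word_pos_alignment (cut_token_ls : List String) (origin_token_ls : List String) : List (Int × List Int) :=
  (wpaLoopA cut_token_ls origin_token_ls 0 0 0 PySem.Dict.empty).items

-- ===== PORT B =====
-- 'prefix = [0]; for tok in origin_token_ls: prefix.append(prefix[-1] + len(tok))'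
def wpaPrefixB (origin : List String) : List Nat :=
  origin.foldl (fun p tok => p ++ [(p.getLast?.getD 0) + tok.length]) [0]

-- B's hand-rolled bisect_left over 'prefix' ('while lo < hi: …'); indices stay in range,
-- so the in-range read 'prefix[mid]' is ported as getD.
def wpaBisectB (pfx : List Nat) (target lo hi : Nat) : Nat :=
  if lo < hi then
    let mid := (lo + hi) / 2
    if pfx.getD mid 0 < target then wpaBisectB pfx target (mid + 1) hi
    else wpaBisectB pfx target lo mid
  else lo
termination_by hi - lo
decreasing_by all_goals omega

-- 'for i in range(len(cut_token_ls)):' with its break; in-range reads ported as getD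
def wpaOuterB (cut origin : List String) (pfx : List Nat) (i pos : Nat)
    (dic : PySem.Dict Int (List Int)) : PySem.Dict Int (List Int) :=
  if i < cut.length then
    if origin.length ≤ pos then dic
    else
      let target := pfx.getD pos 0 + (cut.getD i "").length
      let lo := wpaBisectB pfx target (pos + 1) (origin.length + 1)
      let c := min (lo - pos) (origin.length - pos)
      wpaOuterB cut origin pfx (i + 1) (pos + c)
        (dic.insert (i : Int) (PySem.List.pyRange (pos : Int) ((pos + c : Nat) : Int) 1))
  else dic
termination_by cut.length - i
decreasing_by omega

def word_pos_alignment_alt (cut_token_ls : List String) (origin_token_ls : List String) : List (Int × List Int) :=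
  (wpaOuterB cut_token_ls origin_token_ls (wpaPrefixB origin_token_ls) 0 0 PySem.Dict.empty).items

-- ===== PRECONDITION & SPEC =====
def Spec_word_pos_alignment (cut_token_ls : List String) (origin_token_ls : List String) (out : List (Int × List Int)) : Prop := out = word_pos_alignment_alt cut_token_ls origin_token_ls
instance (cut_token_ls : List String) (origin_token_ls : List String) (out : List (Int × List Int)) : Decidable (Spec_word_pos_alignment cut_token_ls origin_token_ls out) := by unfold Spec_word_pos_alignment; infer_instance

-- ===== CLAIM (what is proved, stated in full; the proofs are below) =====
def Claim_equal_word_pos_alignment : Prop := ∀ (cut_token_ls : List String) (origin_token_ls : List String), Dom_word_pos_alignment cut_token_ls origin_token_ls → Spec_word_pos_alignment cut_token_ls origin_token_ls (word_pos_alignment cut_token_ls origin_token_ls)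

-- ===== LEMMAS AND PROOFS =====

-- prefix-sum of origin-char lengths (proof-side characterisation of B's 'prefix' list)
def wpaS (origin : List String) (k : Nat) : Nat := ((origin.take k).map String.length).sum

-- greedy count: how many origin chars A consumes for one cut word of length L,
-- starting at position pos with carried last_len
def wpaGc (origin : List String) (L pos last : Nat) : Nat :=
  if h : pos < origin.length then
    if L > (origin[pos]'h).length + last then 1 + wpaGc origin L (pos + 1) (last + (origin[pos]'h).length)
    else 1
  else 0
termination_by origin.length - pos
decreasing_by omega

theorem wpaS_succ (origin : List String) (p : Nat) (h : p < origin.length) :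
    wpaS origin (p + 1) = wpaS origin p + (origin[p]'h).length := by
  unfold wpaS
  rw [List.map_take, List.map_take, List.sum_take_succ _ p (by simpa using h)]
  simp

theorem wpaS_mono (origin : List String) {i j : Nat} (hij : i ≤ j) :
    wpaS origin i ≤ wpaS origin j := by
  induction j with
  | zero =>
    have : i = 0 := by omega
    subst this; exact le_refl _
  | succ j ih =>
    rcases Nat.eq_or_lt_of_le hij with rfl | hlt
    · exact le_refl _
    · rcases Nat.lt_or_ge j origin.length with hj | hj
      · exact le_trans (ih (by omega)) (by rw [wpaS_succ origin j hj]; omega)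
      · have : wpaS origin (j + 1) = wpaS origin j := by
          unfold wpaS; rw [List.take_of_length_le (by omega), List.take_of_length_le (by omega)]
        rw [this]; exact ih (by omega)

-- proof-side view of B's growing prefix list: the tail appended after the seed
def wpaPs (s : Nat) : List String → List Nat
  | [] => []
  | t :: r => (s + t.length) :: wpaPs (s + t.length) r

theorem wpaPrefixB_foldl (l : List String) :
    ∀ (acc : List Nat) (s : Nat), acc.getLast? = some s →
      l.foldl (fun p tok => p ++ [(p.getLast?.getD 0) + tok.length]) acc = acc ++ wpaPs s l := by
  induction l with
  | nil => intro acc s _; simp [wpaPs]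
  | cons t r ih =>
    intro acc s hlast
    simp only [List.foldl_cons]
    rw [ih (acc ++ [acc.getLast?.getD 0 + t.length]) (s + t.length)
        (by rw [List.getLast?_concat, hlast]; rfl)]
    rw [hlast]
    simp [wpaPs]

theorem wpaPs_getD (l : List String) :
    ∀ (s k : Nat), k < l.length → (wpaPs s l).getD k 0 = s + wpaS l (k + 1) := by
  induction l with
  | nil => intro s k hk; simp at hk
  | cons t r ih =>
    intro s k hk
    cases k with
    | zero =>
      simp only [wpaPs, List.getD_cons_zero]
      unfold wpaS; simp
    | succ j =>
      simp only [wpaPs, List.getD_cons_succ]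
      rw [ih (s + t.length) j (by simpa using hk)]
      have : wpaS (t :: r) (j + 1 + 1) = t.length + wpaS r (j + 1) := by
        unfold wpaS; simp [List.take_succ_cons]
      omega

theorem wpaPrefixB_getD (origin : List String) (k : Nat) (hk : k ≤ origin.length) :
    (wpaPrefixB origin).getD k 0 = wpaS origin k := by
  unfold wpaPrefixB
  rw [wpaPrefixB_foldl origin [0] 0 (by rfl)]
  cases k with
  | zero => simp [wpaS]
  | succ j =>
    have : ([0] ++ wpaPs 0 origin).getD (j + 1) 0 = (wpaPs 0 origin).getD j 0 := by
      simp only [List.singleton_append, List.getD_cons_succ]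
    rw [this, wpaPs_getD origin 0 j (by omega)]
    omega

-- what B's binary search returns: first index in [lo, hi] whose prefix value reaches target
theorem wpaBisectB_spec (pfx : List Nat) (t n : Nat)
    (hm : ∀ i j, i ≤ j → j ≤ n → pfx.getD i 0 ≤ pfx.getD j 0) :
    ∀ fuel lo hi, hi - lo ≤ fuel → lo ≤ hi → hi ≤ n + 1 →
      lo ≤ wpaBisectB pfx t lo hi ∧ wpaBisectB pfx t lo hi ≤ hi ∧
      (∀ i, lo ≤ i → i < wpaBisectB pfx t lo hi → pfx.getD i 0 < t) ∧
      (wpaBisectB pfx t lo hi < hi → t ≤ pfx.getD (wpaBisectB pfx t lo hi) 0) := by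
  intro fuel
  induction fuel with
  | zero =>
    intro lo hi hf hlh _
    have : lo = hi := by omega
    subst this
    rw [wpaBisectB, if_neg (lt_irrefl _)]
    exact ⟨le_refl _, le_refl _, by omega, by omega⟩
  | succ f ih =>
    intro lo hi hf hlh hhn
    rw [wpaBisectB]
    by_cases h : lo < hi
    · rw [if_pos h]
      simp only
      by_cases hc : pfx.getD ((lo + hi) / 2) 0 < t
      · rw [if_pos hc]
        obtain ⟨h1, h2, h3, h4⟩ := ih ((lo + hi) / 2 + 1) hi (by omega) (by omega) hhn
        refine ⟨by omega, h2, ?_, h4⟩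
        intro i hi1 hi2
        by_cases hle : i ≤ (lo + hi) / 2
        · exact lt_of_le_of_lt (hm i ((lo + hi) / 2) hle (by omega)) hc
        · exact h3 i (by omega) hi2
      · rw [if_neg hc]
        obtain ⟨h1, h2, h3, h4⟩ := ih lo ((lo + hi) / 2) (by omega) (by omega) (by omega)
        refine ⟨h1, by omega, h3, ?_⟩
        intro hr
        by_cases hlt : wpaBisectB pfx t lo ((lo + hi) / 2) < (lo + hi) / 2
        · exact h4 hlt
        · have : wpaBisectB pfx t lo ((lo + hi) / 2) = (lo + hi) / 2 := by omega
          rw [this]; omega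
    · rw [if_neg h]; exact ⟨le_refl _, by omega, by omega, by omega⟩

-- the greedy count satisfies the same first-crossing characterisation
theorem wpaGc_spec (origin : List String) (L pos0 : Nat) :
    ∀ fuel p last, origin.length - p ≤ fuel → p < origin.length →
      wpaS origin pos0 + last = wpaS origin p →
      1 ≤ wpaGc origin L p last ∧ p + wpaGc origin L p last ≤ origin.length ∧
      (∀ i, p < i → i < p + wpaGc origin L p last → wpaS origin i < wpaS origin pos0 + L) ∧
      (wpaS origin pos0 + L ≤ wpaS origin (p + wpaGc origin L p last) ∨
        p + wpaGc origin L p last = origin.length) := by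
  intro fuel
  induction fuel with
  | zero => intro p last hf hp _; omega
  | succ f ih =>
    intro p last hf hp hinv
    rw [wpaGc]
    rw [dif_pos hp]
    have hsucc := wpaS_succ origin p hp
    by_cases hc : L > (origin[p]'hp).length + last
    · rw [if_pos hc]
      by_cases hpn : p + 1 < origin.length
      · obtain ⟨h1, h2, h3, h4⟩ := ih (p + 1) (last + (origin[p]'hp).length) (by omega) hpn (by omega)
        have hadd : p + (1 + wpaGc origin L (p + 1) (last + (origin[p]'hp).length))
            = p + 1 + wpaGc origin L (p + 1) (last + (origin[p]'hp).length) := by omega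
        rw [hadd]
        refine ⟨by omega, by omega, ?_, by omega⟩
        intro i hi1 hi2
        by_cases hie : i = p + 1
        · subst hie; omega
        · exact h3 i (by omega) (by omega)
      · have hz : wpaGc origin L (p + 1) (last + (origin[p]'hp).length) = 0 := by
          rw [wpaGc]; rw [dif_neg (by omega)]
        rw [hz]
        refine ⟨by omega, by omega, by omega, Or.inr (by omega)⟩
    · rw [if_neg hc]
      refine ⟨le_refl _, by omega, by omega, Or.inl (by omega)⟩

-- hence B's 'min(lo - pos, n - pos)' IS A's greedy consumption count
theorem wpaCount_eq (origin : List String) (L pos : Nat) (hp : pos < origin.length) :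
    min (wpaBisectB (wpaPrefixB origin) (wpaS origin pos + L) (pos + 1) (origin.length + 1) - pos)
        (origin.length - pos) = wpaGc origin L pos 0 := by
  set n := origin.length with hn
  have hm : ∀ i j, i ≤ j → j ≤ n → (wpaPrefixB origin).getD i 0 ≤ (wpaPrefixB origin).getD j 0 := by
    intro i j hij hjn
    rw [wpaPrefixB_getD origin i (by omega), wpaPrefixB_getD origin j hjn]
    exact wpaS_mono origin hij
  set t := wpaS origin pos + L with ht
  set r := wpaBisectB (wpaPrefixB origin) t (pos + 1) (n + 1) with hr
  obtain ⟨b1, b2, b3, b4⟩ := wpaBisectB_spec (wpaPrefixB origin) t n hm (n + 1) (pos + 1) (n + 1)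
    (by omega) (by omega) (le_refl _)
  obtain ⟨g1, g2, g3, g4⟩ := wpaGc_spec origin L pos (n + 1) pos 0 (by omega) hp (by omega)
  set c := wpaGc origin L pos 0 with hc
  have hb3 : ∀ i, pos + 1 ≤ i → i < r → wpaS origin i < t := by
    intro i h1 h2
    have := b3 i h1 h2
    rwa [wpaPrefixB_getD origin i (by omega)] at this
  have hb4 : r < n + 1 → t ≤ wpaS origin r := by
    intro h
    have := b4 h
    rwa [wpaPrefixB_getD origin r (by omega)] at this
  by_cases hT : t ≤ wpaS origin (pos + c)
  · -- the greedy stop is the first crossing, so the binary search lands exactly there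
    have hre : r = pos + c := by
      rcases Nat.lt_trichotomy r (pos + c) with hlt | heq | hgt
      · have h1 := g3 r (by omega) hlt
        have h2 := hb4 (by omega)
        omega
      · exact heq
      · have := hb3 (pos + c) (by omega) hgt
        omega
    omega
  · -- the word swallows the rest of origin: every prefix value stays below t, r = n + 1
    have hend : pos + c = n := by
      rcases g4 with h | h
      · omega
      · exact h
    rw [hend] at hT
    have hre : r = n + 1 := by
      by_contra hne
      have hrn : r ≤ n := by omega
      have h2 := hb4 (by omega)
      rcases Nat.lt_trichotomy r n with hlt | heq | hgt
      · have := g3 r (by omega) (by omega)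
        omega
      · rw [heq] at h2; omega
      · omega
    omega

-- A's explicit not-in/append branches are one 'append to the slot' dict update
theorem wpa_step_eq (dic : PySem.Dict Int (List Int)) (k v : Int) :
    (if dic.contains k then dic.insert k (dic.getD k [] ++ [v]) else dic.insert k [v])
      = dic.modify k [] (fun l => l ++ [v]) := by
  have hmod : dic.modify k [] (fun l => l ++ [v]) = dic.insert k (dic.getD k [] ++ [v]) := rfl
  rw [hmod]
  by_cases h : dic.contains k = false
  · rw [if_neg (by simp [h]), PySem.Dict.getD_of_not_contains (h := h), List.nil_append]
  · rw [if_pos (Bool.not_eq_false _ ▸ h)]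

theorem wpa_modify_modify (d : PySem.Dict Int (List Int)) (k : Int) (a b : List Int) :
    (d.modify k [] (· ++ a)).modify k [] (· ++ b) = d.modify k [] (· ++ (a ++ b)) := by
  have h1 : d.modify k [] (· ++ a) = d.insert k (d.getD k [] ++ a) := rfl
  have h2 : d.modify k [] (· ++ (a ++ b)) = d.insert k (d.getD k [] ++ (a ++ b)) := rfl
  rw [h1, h2]
  have h3 : (d.insert k (d.getD k [] ++ a)).modify k [] (· ++ b)
      = (d.insert k (d.getD k [] ++ a)).insert k ((d.insert k (d.getD k [] ++ a)).getD k [] ++ b) := rfl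
  rw [h3, PySem.Dict.getD_insert_self, PySem.Dict.insert_insert_self, List.append_assoc]

-- unroll A's flat loop one cut word at a time: it appends exactly the range of consumed positions
theorem wpaLoopA_unroll (cut origin : List String) (cur : Nat) (hcur : cur < cut.length) :
    ∀ fuel pos last dic, origin.length - pos ≤ fuel → pos < origin.length →
      wpaLoopA cut origin cur pos last dic
        = wpaLoopA cut origin (cur + 1) (pos + wpaGc origin (cut[cur]'hcur).length pos last) 0
            (dic.modify (cur : Int) []
              (· ++ PySem.List.pyRange (pos : Int)
                  ((pos + wpaGc origin (cut[cur]'hcur).length pos last : Nat) : Int) 1)) := by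
  intro fuel
  induction fuel with
  | zero => intro pos last dic hf hp; omega
  | succ f ih =>
    intro pos last dic hf hp
    rw [wpaLoopA, dif_pos ⟨hcur, hp⟩]
    simp only
    rw [wpa_step_eq]
    by_cases hc : (cut[cur]'hcur).length > (origin[pos]'hp).length + last
    · set g' := wpaGc origin (cut[cur]'hcur).length (pos + 1) (last + (origin[pos]'hp).length) with hg'
      have hgc : wpaGc origin (cut[cur]'hcur).length pos last = 1 + g' := by
        rw [wpaGc, dif_pos hp, if_pos hc]
      rw [if_pos hc, hgc]
      have e1 : pos + (1 + g') = pos + 1 + g' := by omega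
      rw [e1]
      by_cases hpn : pos + 1 < origin.length
      · rw [ih (pos + 1) (last + (origin[pos]'hp).length)
            (dic.modify (cur : Int) [] (· ++ [(pos : Int)])) (by omega) hpn]
        rw [← hg', wpa_modify_modify]
        have e2 : PySem.List.pyRange (pos : Int) ((pos + 1 + g' : Nat) : Int) 1
            = (pos : Int) :: PySem.List.pyRange ((pos + 1 : Nat) : Int) ((pos + 1 + g' : Nat) : Int) 1 := by
          rw [PySem.List.pyRange_one_cons (by push_cast; omega)]
          norm_cast
        rw [e2]
        simp only [List.singleton_append]
      · -- origin exhausted right after this consume: both sides stop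
        have hz : g' = 0 := by rw [hg', wpaGc, dif_neg (by omega)]
        rw [hz]
        rw [wpaLoopA, dif_neg (by omega)]
        rw [wpaLoopA, dif_neg (by simp; omega)]
        congr 1
        have e3 : ((pos + 1 + 0 : Nat) : Int) = (pos : Int) + 1 := by push_cast; ring
        rw [e3, PySem.List.pyRange_one_singleton]
    · have hgc : wpaGc origin (cut[cur]'hcur).length pos last = 1 := by
        rw [wpaGc, dif_pos hp, if_neg hc]
      rw [if_neg hc, hgc]
      congr 1
      have e3 : ((pos + 1 : Nat) : Int) = (pos : Int) + 1 := by push_cast; ring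
      rw [e3, PySem.List.pyRange_one_singleton]

-- main correspondence: A's flat loop from word i = B's outer loop from word i
theorem wpa_main (cut origin : List String) :
    ∀ fuel i pos dic, cut.length - i ≤ fuel →
      (∀ k : Int, dic.contains k = true → k < (i : Int)) →
      wpaLoopA cut origin i pos 0 dic = wpaOuterB cut origin (wpaPrefixB origin) i pos dic := by
  intro fuel
  induction fuel with
  | zero =>
    intro i pos dic hf _
    rw [wpaLoopA, dif_neg (by simp; omega), wpaOuterB, if_neg (by omega)]
  | succ f ih =>
    intro i pos dic hf hkeys
    rw [wpaOuterB]
    by_cases hi : i < cut.length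
    · rw [if_pos hi]
      by_cases hpos : origin.length ≤ pos
      · rw [if_pos hpos, wpaLoopA, dif_neg (by simp; omega)]
      · rw [if_neg hpos]
        simp only
        rw [not_le] at hpos
        have hgetD : cut.getD i "" = cut[i]'hi := List.getD_eq_getElem cut "" hi
        have htarget : (wpaPrefixB origin).getD pos 0 + (cut.getD i "").length
            = wpaS origin pos + (cut[i]'hi).length := by
          rw [wpaPrefixB_getD origin pos (by omega), hgetD]
        rw [htarget]
        have hcnt := wpaCount_eq origin (cut[i]'hi).length pos hpos
        rw [hcnt]
        rw [wpaLoopA_unroll cut origin i hi (origin.length + 1) pos 0 dic (by omega) hpos]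
        have hfresh : dic.contains (i : Int) = false := by
          by_contra h
          have := hkeys (i : Int) (by simpa using h)
          omega
        have hmodins : dic.modify (i : Int) []
              (· ++ PySem.List.pyRange (pos : Int)
                ((pos + wpaGc origin (cut[i]'hi).length pos 0 : Nat) : Int) 1)
            = dic.insert (i : Int)
              (PySem.List.pyRange (pos : Int)
                ((pos + wpaGc origin (cut[i]'hi).length pos 0 : Nat) : Int) 1) := by
          have h1 : dic.modify (i : Int) []
                (· ++ PySem.List.pyRange (pos : Int)
                  ((pos + wpaGc origin (cut[i]'hi).length pos 0 : Nat) : Int) 1)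
              = dic.insert (i : Int)
                (dic.getD (i : Int) [] ++ PySem.List.pyRange (pos : Int)
                  ((pos + wpaGc origin (cut[i]'hi).length pos 0 : Nat) : Int) 1) := rfl
          rw [h1, PySem.Dict.getD_of_not_contains (h := hfresh), List.nil_append]
        rw [hmodins]
        apply ih
        · omega
        · intro k hk
          rw [PySem.Dict.contains_insert] at hk
          rcases Bool.or_eq_true_iff.mp hk with h | h
          · have : k = (i : Int) := by simpa using h
            omega
          · have := hkeys k h
            omega
    · rw [if_neg hi, wpaLoopA, dif_neg (by simp; omega)]

-- ===== VERDICT (by name: the statement is the Claim_ definition above) =====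
theorem word_pos_alignment_spec : Claim_equal_word_pos_alignment := by
  intro cut origin _
  unfold Spec_word_pos_alignment word_pos_alignment word_pos_alignment_alt
  rw [wpa_main cut origin (cut.length + 1) 0 0 PySem.Dict.empty (by omega)
      (by intro k hk; rw [PySem.Dict.contains_empty] at hk; exact absurd hk (by simp))]
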